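-- pv_equiv track=rewrite | github.com/paalso/learning_with_python | 08 Strings/8-5.py | count_words_with_substr
-- ===== SOURCE A (Python) =====
-- import string
--
-- def count_words_with_substr(s, substr):
--     counter = 0
--     str_sans_punctuation = ''
--     for c in s:
--         if not c in string.punctuation:
--             str_sans_punctuation += c
--     for word in str_sans_punctuation.split():
--         if substr in word:
--             counter += 1
--     return counter
-- ===== SOURCE B (Python) =====
-- import string
--
-- def count_words_with_substr(s, substr):
--     # single fused pass: strip punctuation, detect word boundaries and count in one traversal
--     counter = 0
--     buf = []
--     for c in s:
--         if c in string.punctuation: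
--             continue
--         if c.isspace():
--             if buf and substr in ''.join(buf):
--                 counter += 1
--             buf = []
--         else:
--             buf.append(c)
--     if buf and substr in ''.join(buf):
--         counter += 1
--     return counter
-- ===== Notes on version B (the rewrite author's own statement) =====
-- stated objective: alternative
-- what changed: A first builds a punctuation-free copy of the string and then splits it and scans the words; B is one fused stateful pass over the characters maintaining a current-word buffer and the counter, flushing at whitespace boundaries.
import Mathlib
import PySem

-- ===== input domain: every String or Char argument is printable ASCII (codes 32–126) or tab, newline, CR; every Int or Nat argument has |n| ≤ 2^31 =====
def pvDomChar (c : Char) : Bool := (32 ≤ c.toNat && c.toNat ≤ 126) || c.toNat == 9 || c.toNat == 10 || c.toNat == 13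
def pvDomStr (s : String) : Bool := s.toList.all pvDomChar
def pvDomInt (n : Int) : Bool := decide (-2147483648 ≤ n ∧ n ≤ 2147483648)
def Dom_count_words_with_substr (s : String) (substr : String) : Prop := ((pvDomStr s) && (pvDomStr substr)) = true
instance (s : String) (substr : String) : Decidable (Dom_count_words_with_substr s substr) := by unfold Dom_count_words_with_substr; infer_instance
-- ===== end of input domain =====

-- B fuses A's two phases (strip punctuation into a new string, then split-and-scan) into one
-- stateful pass with a current-word buffer; same cost class, different structure (objective: alternative).

-- string.punctuation (CPython's constant)
def pvPunct : List Char := "!\"#$%&'()*+,-./:;<=>?@[\\]^_`{|}~".toList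

-- ===== PORT A =====
def count_words_with_substr (s : String) (substr : String) : Int :=
  let str_sans_punctuation : List Char :=
    s.toList.foldl (fun acc c => if !(pvPunct.contains c) then acc ++ [c] else acc) []
  (PySem.Chars.split₀ str_sans_punctuation).foldl
    (fun counter word => if PySem.Chars.isIn substr.toList word then counter + 1 else counter) 0

-- ===== PORT B =====
-- one pass: skip punctuation, flush the buffer at whitespace, append otherwise
def cwsGo (substr : List Char) : List Char → List Char → Int → Int
  | [], buf, counter =>
      if !buf.isEmpty && PySem.Chars.isIn substr buf then counter + 1 else counter
  | c :: rest, buf, counter =>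
      if pvPunct.contains c then cwsGo substr rest buf counter
      else if PySem.Chars.isspace c then
        cwsGo substr rest []
          (if !buf.isEmpty && PySem.Chars.isIn substr buf then counter + 1 else counter)
      else cwsGo substr rest (buf ++ [c]) counter

def count_words_with_substr_alt (s : String) (substr : String) : Int :=
  cwsGo substr.toList s.toList [] 0

-- ===== PRECONDITION & SPEC =====
def Spec_count_words_with_substr (s : String) (substr : String) (out : Int) : Prop := out = count_words_with_substr_alt s substr
instance (s : String) (substr : String) (out : Int) : Decidable (Spec_count_words_with_substr s substr out) := by unfold Spec_count_words_with_substr; infer_instance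

-- ===== CLAIM (what is proved, stated in full; the proofs are below) =====
def Claim_equal_count_words_with_substr : Prop := ∀ (s : String) (substr : String), Dom_count_words_with_substr s substr → Spec_count_words_with_substr s substr (count_words_with_substr s substr)

-- ===== LEMMAS AND PROOFS =====

-- the word-counting fold of port A, as a function of the word list
def countW (substr : List Char) (ws : List (List Char)) (n : Int) : Int :=
  ws.foldl (fun counter word => if PySem.Chars.isIn substr word then counter + 1 else counter) n

theorem countW_shift (substr : List Char) (ws : List (List Char)) (n : Int) :
    countW substr ws n = n + countW substr ws 0 := by
  induction ws generalizing n with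
  | nil => simp [countW]
  | cons w ws ih =>
    have h1 : countW substr (w :: ws) n
        = countW substr ws (if PySem.Chars.isIn substr w then n + 1 else n) := rfl
    have h2 : countW substr (w :: ws) 0
        = countW substr ws (if PySem.Chars.isIn substr w then 0 + 1 else 0) := rfl
    rw [h1, h2]
    split_ifs
    · rw [ih (n + 1), ih (0 + 1)]
      ring
    · exact ih n

theorem countW_append (substr : List Char) (xs ys : List (List Char)) :
    countW substr (xs ++ ys) 0 = countW substr xs 0 + countW substr ys 0 := by
  have h : countW substr (xs ++ ys) 0 = countW substr ys (countW substr xs 0) := by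
    simp only [countW, List.foldl_append]
  rw [h, countW_shift]

-- A's character fold builds exactly the filtered list
theorem filter_fold (cs : List Char) (acc : List Char) :
    cs.foldl (fun acc c => if !(pvPunct.contains c) then acc ++ [c] else acc) acc
      = acc ++ cs.filter (fun c => !(pvPunct.contains c)) := by
  induction cs generalizing acc with
  | nil => simp
  | cons c cs ih =>
    by_cases h : pvPunct.contains c = true
    · simp only [List.foldl, List.filter_cons, h, Bool.not_true, Bool.false_eq_true, if_false]
      exact ih acc
    · have h' : pvPunct.contains c = false := by simpa using h
      simp only [List.foldl, List.filter_cons, h', Bool.not_false, if_true]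
      rw [ih]
      simp

-- split₀.go's accumulator is a reversed prefix of the result
theorem split0_go_acc (cs : List Char) (cur : List Char) (acc : List (List Char)) :
    PySem.Chars.split₀.go cs cur acc = acc.reverse ++ PySem.Chars.split₀.go cs cur [] := by
  induction cs generalizing cur acc with
  | nil =>
    simp only [PySem.Chars.split₀.go]
    split_ifs <;> simp
  | cons c cs ih =>
    simp only [PySem.Chars.split₀.go]
    split_ifs with h1 h2
    · rw [ih [] acc]
    · rw [ih [] (cur.reverse :: acc), ih [] [cur.reverse]]
      simp
    · exact ih (c :: cur) acc

-- the fused loop equals counting over split₀ of the filtered remainder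
theorem cwsGo_eq (substr : List Char) (cs : List Char) (buf : List Char) (counter : Int) :
    cwsGo substr cs buf counter
      = counter + countW substr
          (PySem.Chars.split₀.go (cs.filter (fun c => !(pvPunct.contains c))) buf.reverse []) 0 := by
  induction cs generalizing buf counter with
  | nil =>
    simp only [cwsGo, List.filter_nil, PySem.Chars.split₀.go]
    by_cases hb : buf.isEmpty = true
    · simp [List.isEmpty_iff.mp hb, countW]
    · have : buf.reverse.isEmpty = false := by
        simp [List.isEmpty_iff] at *; exact hb
      simp only [this, Bool.false_eq_true, if_false, List.reverse_reverse]
      simp [hb, countW]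
      split_ifs <;> ring
  | cons c cs ih =>
    simp only [cwsGo, List.filter]
    by_cases hp : pvPunct.contains c = true
    · simp only [hp, Bool.not_true, if_true]
      exact ih buf counter
    · simp only [hp, Bool.not_false, Bool.false_eq_true, if_false]
      by_cases hs : PySem.Chars.isspace c = true
      · simp only [hs, if_true, PySem.Chars.split₀.go]
        by_cases hb : buf.isEmpty = true
        · have hbr : buf.reverse.isEmpty = true := by
            simp [List.isEmpty_iff] at *; exact hb
          simp only [hbr, if_true, hb, Bool.not_true, Bool.false_and, Bool.false_eq_true, if_false]
          exact ih [] counter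
        · have hbr : buf.reverse.isEmpty = false := by
            simp [List.isEmpty_iff] at *; exact hb
          simp only [hbr, Bool.false_eq_true, if_false, List.reverse_reverse]
          rw [ih, split0_go_acc _ [] [buf]]
          simp only [List.reverse_singleton]
          rw [countW_append]
          simp only [countW, List.foldl]
          simp [hb]
          split_ifs <;> ring
      · simp only [hs, Bool.false_eq_true, if_false, PySem.Chars.split₀.go]
        rw [ih]
        simp [List.reverse_append]
-- ===== VERDICT (by name: the statement is the Claim_ definition above) =====
theorem count_words_with_substr_spec : Claim_equal_count_words_with_substr := by
  intro s substr _
  unfold Spec_count_words_with_substr count_words_with_substr count_words_with_substr_alt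
  rw [cwsGo_eq, filter_fold]
  simp [PySem.Chars.split₀, countW]
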